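-- pv_equiv track=rewrite | github.com/jumploop/OD_test_questions | 表示数字.py | func
-- ===== SOURCE A (Python) =====
-- def func(s: str):
--     # 解题想法：判断当前位置是否为数字，再根据位置来具体放”*“，
--     l = list(s)
--     res = ""
--     for i in range(len(s)):
--         if l[i].isnumeric():
--             if i == 0 or not l[i - 1].isnumeric():
--                 res = f"{res}*{l[i]}"
--             if i > 0 and l[i - 1].isnumeric():
--                 res = res + l[i]
--             if i == len(l) - 1:
--                 res = f"{res}*"
--         elif i == 0 or i != 0 and not l[i - 1].isnumeric():
--             res = res + l[i]
--         else:
--             res = f"{res}*{l[i]}"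
--     return res
-- ===== SOURCE B (Python) =====
-- def func(s: str):
--     # Run-oriented pass: split s into maximal numeric / non-numeric runs,
--     # wrap each numeric run in asterisks.
--     parts = []
--     i, n = 0, len(s)
--     while i < n:
--         j = i
--         if s[i].isnumeric():
--             while j < n and s[j].isnumeric():
--                 j += 1
--             parts.append('*' + s[i:j] + '*')
--         else:
--             while j < n and not s[j].isnumeric():
--                 j += 1
--             parts.append(s[i:j])
--         i = j
--     return ''.join(parts)
-- ===== Notes on version B (the rewrite author's own statement) =====
-- stated objective: simpler
-- what changed: Replaced A's per-character look-behind state machine (index loop consulting l[i-1] and i==len-1 to place asterisks) with a run-oriented pass that peels maximal numeric/non-numeric runs and wraps the numeric ones.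
import Mathlib
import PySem

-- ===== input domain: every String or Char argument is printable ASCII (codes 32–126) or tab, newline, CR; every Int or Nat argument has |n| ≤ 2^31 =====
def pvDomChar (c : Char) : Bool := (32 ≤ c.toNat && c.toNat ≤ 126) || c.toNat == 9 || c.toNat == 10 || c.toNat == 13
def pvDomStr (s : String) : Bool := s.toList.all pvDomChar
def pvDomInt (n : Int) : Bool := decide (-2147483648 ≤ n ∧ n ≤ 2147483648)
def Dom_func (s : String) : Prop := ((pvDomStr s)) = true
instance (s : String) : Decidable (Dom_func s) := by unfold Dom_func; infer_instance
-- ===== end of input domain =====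

-- B replaces A's per-character look-behind state machine by a run-oriented pass
-- (simpler decomposition; same O(n) cost).

-- ===== PORT A =====
-- str.isnumeric: exact on the printable-ASCII domain, where it coincides with isdigit
def isnumA (c : Char) : Bool := PySem.Chars.isdigit c

-- loop body of A's for-loop (res is the string built so far, as List Char)
def stepA (l : List Char) (res : List Char) (i : Int) : List Char :=
  let ci := PySem.List.pyGetD l i ' '
  if isnumA ci then
    let res1 := if i == 0 || !isnumA (PySem.List.pyGetD l (i-1) ' ') then res ++ ['*', ci] else res
    let res2 := if decide (0 < i) && isnumA (PySem.List.pyGetD l (i-1) ' ') then res1 ++ [ci] else res1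
    if i == PySem.List.len l - 1 then res2 ++ ['*'] else res2
  else if i == 0 || (!(i == 0) && !isnumA (PySem.List.pyGetD l (i-1) ' ')) then
    res ++ [ci]
  else
    res ++ ['*', ci]

def func (s : String) : String :=
  let l := s.toList
  String.mk ((PySem.List.pyRange 0 (PySem.List.len l) 1).foldl (stepA l) [])

-- ===== PORT B =====
def isnumB (c : Char) : Bool := PySem.Chars.isdigit c

-- run-oriented pass of Source B: peel one maximal run at a time
def altGo (l : List Char) : List Char :=
  match l with
  | [] => []
  | c :: cs =>
    if h : isnumB c then
      ('*' :: (c :: cs).takeWhile isnumB) ++ '*' :: altGo ((c :: cs).dropWhile isnumB)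
    else
      ((c :: cs).takeWhile (fun d => !isnumB d)) ++ altGo ((c :: cs).dropWhile (fun d => !isnumB d))
  termination_by l.length
  decreasing_by
  · simp only [List.dropWhile_cons, h, if_true]
    exact Nat.lt_succ_of_le (List.length_dropWhile_le _ _)
  · simp only [List.dropWhile_cons, h, Bool.not_false, if_true]
    exact Nat.lt_succ_of_le (List.length_dropWhile_le _ _)

def func_alt (s : String) : String := String.mk (altGo s.toList)

-- ===== PRECONDITION & SPEC =====
def Spec_func (s : String) (out : String) : Prop := out = func_alt s
instance (s : String) (out : String) : Decidable (Spec_func s out) := by unfold Spec_func; infer_instance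

-- ===== CLAIM (what is proved, stated in full; the proofs are below) =====
def Claim_equal_func : Prop := ∀ (s : String), Dom_func s → Spec_func s (func s)

-- ===== LEMMAS AND PROOFS =====

-- "previous char numeric" flag at position k
def prevN (l : List Char) : Nat → Bool
  | 0 => false
  | k + 1 => isnumA (l.getD k ' ')

-- what A's loop appends at position k
def piece (l : List Char) (k : Nat) : List Char :=
  let c := l.getD k ' '
  if isnumA c then
    (if prevN l k then [c] else ['*', c]) ++ (if k = l.length - 1 then ['*'] else [])
  else
    (if prevN l k then ['*', c] else [c])

-- characterisation of A's loop: a state machine over the list carrying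
-- "previous character was numeric"
def wrapA (prev : Bool) : List Char → List Char
  | [] => []
  | c :: cs =>
    if isnumA c then
      (if prev then [c] else ['*', c]) ++ (if cs.isEmpty then ['*'] else []) ++ wrapA true cs
    else
      (if prev then ['*', c] else [c]) ++ wrapA false cs

lemma stepA_eq (l : List Char) (res : List Char) (k : Nat) (hlt : k < l.length) :
    stepA l res (k : Int) = res ++ piece l k := by
  cases k with
  | zero =>
    simp only [stepA, piece, prevN, Nat.cast_zero, PySem.List.pyGetD_zero, PySem.List.len_eq,
      List.getD_eq_getElem?_getD]
    by_cases hnum : isnumA (l[0]?.getD ' ')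
    · simp [hnum]
      split_ifs <;> first | omega | simp [List.append_assoc]
    · simp [hnum]
  | succ j =>
    have hj : ((j + 1 : Nat) : Int) - 1 = ((j : Nat) : Int) := by push_cast; ring
    have h0 : ¬ (((j + 1 : Nat) : Int) = 0) := by omega
    have hpos : (0 : Int) < ((j + 1 : Nat) : Int) := by omega
    simp only [stepA, piece, prevN, hj, PySem.List.pyGetD_natCast, PySem.List.len_eq,
      List.getD_eq_getElem?_getD]
    by_cases hnum : isnumA (l[j+1]?.getD ' ')
    · by_cases hpn : isnumA (l[j]?.getD ' ')
      · simp [hnum, hpn, h0, hpos]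
        split_ifs <;> first | omega | simp [List.append_assoc]
      · simp [hnum, hpn, h0, hpos]
        split_ifs <;> first | omega | simp [List.append_assoc]
    · by_cases hpn : isnumA (l[j]?.getD ' ')
      · simp [hnum, hpn]
        omega
      · simp [hnum, hpn]

lemma wrapA_cons (l : List Char) (k : Nat) (hlt : k < l.length) :
    wrapA (prevN l k) (l.drop k) = piece l k ++ wrapA (prevN l (k + 1)) (l.drop (k + 1)) := by
  have hdrop : l.drop k = l[k] :: l.drop (k + 1) := (List.getElem_cons_drop hlt).symm
  have hget : l.getD k ' ' = l[k] := List.getD_eq_getElem l ' ' hlt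
  have hempty : (l.drop (k + 1)).isEmpty = decide (k = l.length - 1) := by
    by_cases h : k = l.length - 1
    · have hnil : l.drop (k + 1) = [] := by rw [List.drop_eq_nil_iff]; omega
      simp [hnil, h]
      omega
    · have hne : l.drop (k + 1) ≠ [] := by rw [Ne, List.drop_eq_nil_iff]; omega
      rcases List.exists_cons_of_ne_nil hne with ⟨d, ds, hcons⟩
      simp [hcons, h]
  have hprev1 : prevN l (k + 1) = isnumA (l.getD k ' ') := rfl
  rw [hdrop, wrapA]
  simp only [piece, hempty, hprev1, hget]
  by_cases hlast : k = l.length - 1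
  · have hl' : decide (k = l.length - 1) = true := by simp [hlast]
    simp only [hl', if_pos hlast]
    by_cases hnum : isnumA l[k] <;> simp [hnum, List.append_assoc]
  · have hl' : decide (k = l.length - 1) = false := by simp [hlast]
    simp only [hl', if_neg hlast]
    by_cases hnum : isnumA l[k] <;> simp [hnum, List.append_assoc]

lemma foldA (l : List Char) (m k : Nat) (res : List Char)
    (hm : l.length - k ≤ m) (hk : k ≤ l.length) :
    (PySem.List.pyRange (k : Int) (PySem.List.len l) 1).foldl (stepA l) res
      = res ++ wrapA (prevN l k) (l.drop k) := by
  induction m generalizing k res with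
  | zero =>
    have hk' : k = l.length := by omega
    subst hk'
    rw [PySem.List.pyRange_one_eq_nil (by simp)]
    simp [wrapA]
  | succ m ih =>
    rcases Nat.eq_or_lt_of_le hk with hk' | hlt
    · subst hk'
      rw [PySem.List.pyRange_one_eq_nil (by simp)]
      simp [wrapA]
    · rw [PySem.List.pyRange_one_cons (by simp; omega), List.foldl_cons]
      have hcast : ((k : Int) + 1) = ((k + 1 : Nat) : Int) := by push_cast; ring
      rw [stepA_eq l res k hlt, hcast, ih (k + 1) _ (by omega) (by omega),
          wrapA_cons l k hlt, List.append_assoc]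

-- altGo absorbs a leading (possibly empty) non-numeric run
lemma altGo_nonnum (l : List Char) :
    altGo l = l.takeWhile (fun d => !isnumB d) ++ altGo (l.dropWhile (fun d => !isnumB d)) := by
  cases l with
  | nil => simp [altGo]
  | cons c cs =>
    by_cases h : isnumB c
    · simp [List.takeWhile_cons, List.dropWhile_cons, h]
    · simp [altGo, h]

-- the state machine equals the run-oriented pass
lemma wrapA_eq_altGo (l : List Char) :
    (wrapA false l = altGo l) ∧
    (l ≠ [] → wrapA true l = l.takeWhile isnumB ++ '*' :: altGo (l.dropWhile isnumB)) := by
  induction l with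
  | nil =>
    refine ⟨?_, fun h => absurd rfl h⟩
    simp [altGo, wrapA]
  | cons c cs ih =>
    by_cases h : isnumB c
    · have hA : isnumA c = true := h
      cases cs with
      | nil =>
        constructor
        · simp [altGo, wrapA, hA, h, List.takeWhile_cons, List.dropWhile_cons]
        · intro _
          simp [altGo, wrapA, hA, h, List.takeWhile_cons, List.dropWhile_cons]
      | cons d ds =>
        have htail := ih.2 (by simp)
        constructor
        · rw [wrapA]
          simp only [hA, if_true, List.isEmpty_cons, Bool.false_eq_true, if_false,
            List.nil_append, htail]
          simp [altGo, h, List.takeWhile_cons, List.dropWhile_cons]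
        · intro _
          rw [wrapA]
          simp only [hA, if_true, List.isEmpty_cons, Bool.false_eq_true, if_false,
            List.nil_append, htail]
          simp [List.takeWhile_cons, List.dropWhile_cons, h]
    · have hA : ¬ isnumA c = true := h
      have hP : wrapA false (c :: cs) = c :: altGo cs := by
        rw [wrapA]; simp [hA, ih.1]
      have hstep : altGo (c :: cs) = c :: altGo cs := by
        rw [altGo_nonnum (c :: cs)]
        simp [List.takeWhile_cons, List.dropWhile_cons, h]
        rw [← altGo_nonnum cs]
      constructor
      · rw [hP, hstep]
      · intro _
        rw [wrapA]
        simp only [hA, Bool.false_eq_true, if_false, if_true, ih.1]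
        simp [List.takeWhile_cons, List.dropWhile_cons, h, hstep]

-- ===== VERDICT (by name: the statement is the Claim_ definition above) =====
theorem func_spec : Claim_equal_func := by
  intro s _
  show func s = func_alt s
  show String.mk ((PySem.List.pyRange 0 (PySem.List.len s.toList) 1).foldl (stepA s.toList) [])
      = String.mk (altGo s.toList)
  have h := foldA s.toList s.toList.length 0 [] (by omega) (by omega)
  simp only [Nat.cast_zero] at h
  rw [h]
  simp [prevN, (wrapA_eq_altGo s.toList).1]
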